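-- pv_equiv track=rewrite | github.com/anand0906/DataStructures-Algorithms | Prefix Sum/Problems/Print All Substring Containing Vowels in Even Counts.py | better
-- ===== SOURCE A (Python) =====
-- def better(n,word):
--     ans=[]
--     for i in range(n):
--         cntVowels={k:0 for k in 'aeiou'}
--         for j in range(i,n):
--             if(word[j] in 'aeiou'):
--                 cntVowels[word[j]]+=1
--             flag=True
--             for ch,cnt in cntVowels.items():
--                 if(cnt%2!=0):
--                     flag=False
--                     break
--             if(flag):
--                 ans.append(word[i:j+1])
--     return sorted(ans)
-- ===== SOURCE B (Python) =====
-- def better(n, word):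
--     vowels = 'aeiou'
--     # prefix parity table: pre[k] = bitmask of vowel-count parities of word[:k]
--     pre = [0]
--     m = 0
--     for k in range(n):
--         c = word[k]
--         if c in vowels:
--             m ^= 1 << vowels.index(c)
--         pre.append(m)
--     # word[a:b] (a<b) has all vowel counts even iff pre[a] == pre[b]:
--     # group positions by parity mask and emit every pair inside a group
--     ans = []
--     for mval in dict.fromkeys(pre):
--         ps = [k for k, v in enumerate(pre) if v == mval]
--         for x in range(len(ps)):
--             for y in range(x + 1, len(ps)):
--                 ans.append(word[ps[x]:ps[y]])
--     return sorted(ans)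
-- ===== Notes on version B (the rewrite author's own statement) =====
-- stated objective: alternative
-- what changed: Replaces A's per-start vowel-count dict recomputed over every (i,j) pair by a one-pass prefix parity-mask table whose positions are grouped by mask, emitting word[a:b] for every pair inside a group (pre[a]==pre[b] iff all vowel counts even); the final sort still dominates on large inputs.
import Mathlib
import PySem

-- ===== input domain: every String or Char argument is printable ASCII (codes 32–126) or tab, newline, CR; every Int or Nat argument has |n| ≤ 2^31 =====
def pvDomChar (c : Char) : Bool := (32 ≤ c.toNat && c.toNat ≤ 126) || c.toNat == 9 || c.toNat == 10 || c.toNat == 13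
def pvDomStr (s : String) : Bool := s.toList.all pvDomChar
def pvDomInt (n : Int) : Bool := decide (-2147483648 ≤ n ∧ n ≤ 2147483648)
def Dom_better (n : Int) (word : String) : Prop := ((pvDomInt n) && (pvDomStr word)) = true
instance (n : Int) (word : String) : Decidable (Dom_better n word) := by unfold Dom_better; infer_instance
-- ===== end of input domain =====

-- B replaces A's per-substring vowel recount by a prefix parity table grouped by mask; equal return values proved on Pre_.

-- ===== PORT A =====
def pvVowels : List Char := ['a', 'e', 'i', 'o', 'u']

-- inner loop body: reads word[j], updates cntVowels, computes flag (the break loop = first odd count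
-- seen wins), conditionally appends word[i:j+1]
def aStep (cs : List Char) (i : Int) (st : PySem.Dict Char Int × List String) (j : Int) :
    PySem.Dict Char Int × List String :=
  let cj := PySem.List.pyGetD cs j ' '    -- word[j]; in range under Pre_better
  -- 'word[j] in "aeiou"' on a 1-char string is membership; cntVowels[word[j]] += 1
  -- (the key is always present when the branch is taken, so modify with default 0 is exact)
  let cnt := if cj ∈ pvVowels then st.1.modify cj 0 (· + 1) else st.1
  let flag := cnt.items.foldl (fun fl (p : Char × Int) =>
    if PySem.Int.mod p.2 2 ≠ 0 then false else fl) true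
  (cnt, if flag then st.2 ++ [String.ofList (PySem.List.slice cs (some i) (some (j + 1)))] else st.2)

-- one iteration of the outer loop: cntVowels = {k: 0 for k in 'aeiou'}, then the j loop
def aOuter (cs : List Char) (n : Int) (ans : List String) (i : Int) : List String :=
  ((PySem.List.pyRange i n 1).foldl (aStep cs i)
    (pvVowels.foldl (fun d k => d.insert k 0) PySem.Dict.empty, ans)).2

def better (n : Int) (word : String) : List String :=
  PySem.List.sorted ((PySem.List.pyRange 0 n 1).foldl (aOuter word.toList n) []) (fun x => x) false

-- ===== PORT B =====
-- Python's '^' on ints; exact whenever both arguments are ≥ 0, which holds for all masks here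
def pvIntXor (a b : Int) : Int := ((a.toNat ^^^ b.toNat : Nat) : Int)

-- loop body of the prefix-table pass: m ^= 1 << vowels.index(c) on a vowel, pre.append(m)
def bScan (cs : List Char) (st : List Int × Int) (k : Int) : List Int × Int :=
  let c := PySem.List.pyGetD cs k ' '    -- word[k]; in range under Pre_better
  let m := if c ∈ pvVowels then
             pvIntXor st.2 ((1 : Int) <<< ((PySem.List.index? pvVowels c).getD 0))
           else st.2
  (st.1 ++ [m], m)

-- the two index loops emitting word[ps[x]:ps[y]] for every pair x < y
def bPairs (cs : List Char) (ps : List Int) (ans : List String) : List String :=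
  (PySem.List.pyRange 0 (ps.length : Int) 1).foldl (fun ans x =>
    (PySem.List.pyRange (x + 1) (ps.length : Int) 1).foldl (fun ans y =>
      ans ++ [String.ofList (PySem.List.slice cs
        (some (PySem.List.pyGetD ps x 0)) (some (PySem.List.pyGetD ps y 0)))]) ans) ans

-- one group: ps = [k for k, v in enumerate(pre) if v == mval], then the pair loops
def bGroup (cs : List Char) (pre : List Int) (ans : List String) (mval : Int) : List String :=
  bPairs cs (((PySem.List.enumerate pre 0).filter (fun p => p.2 == mval)).map (·.1)) ans

def better_alt (n : Int) (word : String) : List String :=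
  let cs := word.toList
  let pre := ((PySem.List.pyRange 0 n 1).foldl (bScan cs) ([0], 0)).1
  PySem.List.sorted ((PySem.List.dedup pre).foldl (bGroup cs pre) []) (fun x => x) false

-- ===== PRECONDITION & SPEC =====
-- Pre_ excludes exactly the inputs with n > len(word), on which A's word[j] raises IndexError.
def Pre_better (n : Int) (word : String) : Prop := n ≤ (word.toList.length : Int)
instance (n : Int) (word : String) : Decidable (Pre_better n word) := by unfold Pre_better; infer_instance
def pvWitness_better : Int × String := (4, "area")

def Spec_better (n : Int) (word : String) (out : List String) : Prop := out = better_alt n word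
instance (n : Int) (word : String) (out : List String) : Decidable (Spec_better n word out) := by unfold Spec_better; infer_instance

-- ===== CLAIM (what is proved, stated in full; the proofs are below) =====
def Claim_equal_better : Prop := ∀ (n : Int) (word : String), Dom_better n word → Pre_better n word → Spec_better n word (better n word)

-- ===== LEMMAS AND PROOFS =====

-- the concrete shape of A's count dict: five fixed keys in insertion order
def cntD (a e i o u : Int) : PySem.Dict Char Int := ⟨[('a', a), ('e', e), ('i', i), ('o', o), ('u', u)]⟩

-- parity-mask machinery
def maskStep (m : Int) (c : Char) : Int :=
  if c ∈ pvVowels then pvIntXor m ((1 : Int) <<< ((PySem.List.index? pvVowels c).getD 0)) else m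
def pmOf (l : List Char) : Int := l.foldl maskStep 0
def pmN (cs : List Char) (k : Nat) : Int := pmOf (cs.take k)
def enc5 (b0 b1 b2 b3 b4 : Bool) : Int :=
  (cond b0 1 0) + (cond b1 2 0) + (cond b2 4 0) + (cond b3 8 0) + (cond b4 16 0)
def parc (l : List Char) (c : Char) : Bool := l.count c % 2 == 1
def encL (l : List Char) : Int := enc5 (parc l 'a') (parc l 'e') (parc l 'i') (parc l 'o') (parc l 'u')

-- the segment word[i:b] and its count dict
def seg (cs : List Char) (i b : Nat) : List Char := (cs.drop i).take (b - i)
def segCnt (cs : List Char) (i b : Nat) : PySem.Dict Char Int :=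
  cntD ((seg cs i b).count 'a' : Int) ((seg cs i b).count 'e' : Int) ((seg cs i b).count 'i' : Int)
    ((seg cs i b).count 'o' : Int) ((seg cs i b).count 'u' : Int)
-- the right endpoints A keeps for left endpoint i
def blockB (cs : List Char) (i N : Nat) : List Nat :=
  (List.range' (i + 1) (N - i)).filter (fun b => pmN cs b == pmN cs i)
def subStr (cs : List Char) (i b : Nat) : String := String.ofList (seg cs i b)

-- lexicographically ordered pairs of a list
def lexPairs {α : Type} : List α → List (α × α)
  | [] => []
  | a :: t => (t.map (fun b => (a, b))) ++ lexPairs t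

lemma pmOf_append_singleton (l : List Char) (c : Char) :
    pmOf (l ++ [c]) = maskStep (pmOf l) c := by
  simp [pmOf, List.foldl_append, List.foldl]

lemma take_succ_concat (cs : List Char) (b : Nat) (hb : b < cs.length) :
    cs.take (b + 1) = cs.take b ++ [cs[b]] := by
  rw [List.take_add_one, List.getElem?_eq_getElem hb]
  rfl

lemma parc_append (l : List Char) (c v : Char) :
    parc (l ++ [c]) v = if v = c then !(parc l v) else parc l v := by
  by_cases hv : v = c
  · subst hv
    simp only [parc, List.count_append, List.count_singleton]
    rcases Nat.mod_two_eq_zero_or_one (l.count v) with h | h <;> simp [Nat.add_mod, h]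
  · have h0 : List.count v [c] = 0 := by simp [Ne.symm hv]
    simp [parc, List.count_append, h0, hv]

lemma enc5_xor (c : Char) (hc : c ∈ pvVowels) (b0 b1 b2 b3 b4 : Bool) :
    pvIntXor (enc5 b0 b1 b2 b3 b4) ((1 : Int) <<< ((PySem.List.index? pvVowels c).getD 0))
    = enc5 (if c = 'a' then !b0 else b0) (if c = 'e' then !b1 else b1) (if c = 'i' then !b2 else b2)
        (if c = 'o' then !b3 else b3) (if c = 'u' then !b4 else b4) := by
  fin_cases hc <;> revert b0 b1 b2 b3 b4 <;> decide

lemma pmOf_eq_encL (l : List Char) : pmOf l = encL l := by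
  induction l using List.reverseRecOn with
  | nil => decide
  | append_singleton l c ih =>
    have hstep : pmOf (l ++ [c]) = maskStep (pmOf l) c := by
      simp [pmOf, List.foldl_append, List.foldl]
    rw [hstep, ih]
    by_cases hc : c ∈ pvVowels
    · rw [maskStep, if_pos hc, encL, enc5_xor c hc]
      simp only [encL, parc_append]
      fin_cases hc <;> simp
    · have hv : ∀ v ∈ pvVowels, v ≠ c := by rintro v hv rfl; exact hc hv
      rw [maskStep, if_neg hc]
      simp only [encL, parc_append]
      rw [if_neg (hv 'a' (by decide)), if_neg (hv 'e' (by decide)), if_neg (hv 'i' (by decide)),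
          if_neg (hv 'o' (by decide)), if_neg (hv 'u' (by decide))]

lemma enc5_inj : ∀ b0 b1 b2 b3 b4 c0 c1 c2 c3 c4 : Bool,
    enc5 b0 b1 b2 b3 b4 = enc5 c0 c1 c2 c3 c4 ↔ (b0 = c0 ∧ b1 = c1 ∧ b2 = c2 ∧ b3 = c3 ∧ b4 = c4) := by decide

lemma parc_append₂ (l1 l2 : List Char) (v : Char) :
    parc (l1 ++ l2) v = xor (parc l1 v) (parc l2 v) := by
  simp only [parc, List.count_append]
  rcases Nat.mod_two_eq_zero_or_one (l1.count v) with h1 | h1 <;>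
    rcases Nat.mod_two_eq_zero_or_one (l2.count v) with h2 | h2 <;>
    simp [Nat.add_mod, h1, h2]

-- word[i:b] has all vowel counts even  iff  the prefix masks at i and b agree
lemma pm_eq_iff (cs : List Char) (i b : Nat) (hib : i ≤ b) :
    pmN cs b = pmN cs i ↔ ((seg cs i b).count 'a' % 2 = 0 ∧ (seg cs i b).count 'e' % 2 = 0 ∧
      (seg cs i b).count 'i' % 2 = 0 ∧ (seg cs i b).count 'o' % 2 = 0 ∧ (seg cs i b).count 'u' % 2 = 0) := by
  have hb : cs.take b = cs.take i ++ seg cs i b := by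
    rw [seg, ← List.take_add, Nat.add_sub_cancel' hib]
  rw [pmN, pmN, hb, pmOf_eq_encL, pmOf_eq_encL, encL, encL, enc5_inj]
  simp only [parc_append₂]
  have hx : ∀ (p q : Bool), (xor p q = p) ↔ q = false := by decide
  simp only [hx]
  unfold parc
  rcases Nat.mod_two_eq_zero_or_one ((seg cs i b).count 'a') with h | h <;>
    rcases Nat.mod_two_eq_zero_or_one ((seg cs i b).count 'e') with h2 | h2 <;>
    rcases Nat.mod_two_eq_zero_or_one ((seg cs i b).count 'i') with h3 | h3 <;>
    rcases Nat.mod_two_eq_zero_or_one ((seg cs i b).count 'o') with h4 | h4 <;>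
    rcases Nat.mod_two_eq_zero_or_one ((seg cs i b).count 'u') with h5 | h5 <;>
    simp [h, h2, h3, h4, h5]

lemma flag_eval (a e i o u : Int) :
    (cntD a e i o u).items.foldl (fun fl (p : Char × Int) =>
      if PySem.Int.mod p.2 2 ≠ 0 then false else fl) true
    = (PySem.Int.mod a 2 == 0 && PySem.Int.mod e 2 == 0 && PySem.Int.mod i 2 == 0 &&
       PySem.Int.mod o 2 == 0 && PySem.Int.mod u 2 == 0) := by
  simp [cntD, List.foldl]
  rcases Int.emod_two_eq a with h1 | h1 <;> rcases Int.emod_two_eq e with h2 | h2 <;>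
    rcases Int.emod_two_eq i with h3 | h3 <;> rcases Int.emod_two_eq o with h4 | h4 <;>
    rcases Int.emod_two_eq u with h5 | h5 <;> simp [h1, h2, h3, h4, h5]

lemma modCast (n : Nat) : (PySem.Int.mod (n : Int) 2 == 0) = (n % 2 == 0) := by
  rw [show (2 : Int) = ((2 : Nat) : Int) from rfl, PySem.Int.mod_natCast]
  rcases Nat.mod_two_eq_zero_or_one n with h | h <;> simp [h]

lemma seg_succ (cs : List Char) (i b : Nat) (hib : i ≤ b) (hb : b < cs.length) :
    seg cs i (b + 1) = seg cs i b ++ [cs[b]] := by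
  unfold seg
  have h1 : b + 1 - i = (b - i) + 1 := by omega
  rw [h1, List.take_add_one, List.getElem?_drop]
  have h2 : i + (b - i) = b := by omega
  rw [h2, List.getElem?_eq_getElem hb]
  rfl

-- one inner iteration, at right endpoint b+1
lemma aStep_eq (cs : List Char) (i b : Nat) (acc : List String) (hib : i ≤ b) (hb : b < cs.length) :
    aStep cs i (segCnt cs i b, acc) ((b : Nat) : Int)
    = (segCnt cs i (b + 1), acc ++ (if pmN cs (b + 1) == pmN cs i then [subStr cs i (b + 1)] else [])) := by
  have hget : PySem.List.pyGetD cs ((b : Nat) : Int) ' ' = cs[b] := by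
    rw [PySem.List.pyGetD_natCast]
    exact List.getD_eq_getElem _ _ hb
  have hseg := seg_succ cs i b hib hb
  have hslice : PySem.List.slice cs (some ((i : Nat) : Int)) (some (((b : Nat) : Int) + 1))
      = seg cs i (b + 1) := by
    rw [show (((b : Nat) : Int) + 1) = (((b + 1 : Nat)) : Int) by push_cast; ring,
      PySem.List.slice_natCast]
    rfl
  have hcnt : (if cs[b] ∈ pvVowels then (segCnt cs i b).modify cs[b] 0 (· + 1) else segCnt cs i b)
      = segCnt cs i (b + 1) := by
    by_cases hv : cs[b] ∈ pvVowels
    · rw [if_pos hv]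
      rcases (show cs[b] = 'a' ∨ cs[b] = 'e' ∨ cs[b] = 'i' ∨ cs[b] = 'o' ∨ cs[b] = 'u' by
        simpa [pvVowels] using hv) with h | h | h | h | h <;>
        rw [h] at hseg ⊢ <;>
        · unfold segCnt
          rw [hseg]
          simp only [List.count_append, List.count_cons, List.count_nil]
          unfold cntD
          simp [PySem.Dict.modify, PySem.Dict.insert, PySem.Dict.getD, PySem.Dict.get?,
            PySem.Dict.contains]
    · rw [if_neg hv]
      have hne : ∀ v ∈ pvVowels, v ≠ cs[b] := by rintro v hv' rfl; exact hv hv'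
      have hf : ∀ v ∈ pvVowels, (cs[b] == v) = false := by
        intro v hv'
        exact beq_eq_false_iff_ne.mpr (fun h => (hne v hv') (h.symm))
      unfold segCnt
      rw [hseg]
      simp only [List.count_append, List.count_cons, List.count_nil]
      simp [hf 'a' (by decide), hf 'e' (by decide), hf 'i' (by decide), hf 'o' (by decide),
        hf 'u' (by decide)]
  have hflag : ((segCnt cs i (b + 1)).items.foldl (fun fl (p : Char × Int) =>
        if PySem.Int.mod p.2 2 ≠ 0 then false else fl) true)
      = (pmN cs (b + 1) == pmN cs i) := by
    rw [show (segCnt cs i (b + 1)).items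
        = (cntD ((seg cs i (b+1)).count 'a' : Int) ((seg cs i (b+1)).count 'e' : Int)
            ((seg cs i (b+1)).count 'i' : Int) ((seg cs i (b+1)).count 'o' : Int)
            ((seg cs i (b+1)).count 'u' : Int)).items from rfl, flag_eval]
    rw [modCast, modCast, modCast, modCast, modCast]
    have hodd := pm_eq_iff cs i (b + 1) (by omega)
    by_cases hpm : pmN cs (b + 1) = pmN cs i
    · obtain ⟨h1, h2, h3, h4, h5⟩ := hodd.mp hpm
      simp [hpm, h1, h2, h3, h4, h5]
    · have hR : (pmN cs (b + 1) == pmN cs i) = false := beq_eq_false_iff_ne.mpr hpm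
      rw [hR]
      cases hL : (((seg cs i (b+1)).count 'a' % 2 == 0) && ((seg cs i (b+1)).count 'e' % 2 == 0) &&
          ((seg cs i (b+1)).count 'i' % 2 == 0) && ((seg cs i (b+1)).count 'o' % 2 == 0) &&
          ((seg cs i (b+1)).count 'u' % 2 == 0)) with
      | false => rfl
      | true =>
        simp only [Bool.and_eq_true, beq_iff_eq] at hL
        exact absurd (hodd.mpr ⟨hL.1.1.1.1, hL.1.1.1.2, hL.1.1.2, hL.1.2, hL.2⟩) hpm
  show (let cj := PySem.List.pyGetD cs ((b : Nat) : Int) ' '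
        let cnt := if cj ∈ pvVowels then (segCnt cs i b, acc).1.modify cj 0 (· + 1) else (segCnt cs i b, acc).1
        let flag := cnt.items.foldl (fun fl (p : Char × Int) => if PySem.Int.mod p.2 2 ≠ 0 then false else fl) true
        (cnt, if flag then (segCnt cs i b, acc).2 ++
            [String.ofList (PySem.List.slice cs (some (i : Int)) (some (((b : Nat) : Int) + 1)))]
          else (segCnt cs i b, acc).2)) = _
  simp only [hget]
  rw [show (if cs[b] ∈ pvVowels then (segCnt cs i b, acc).1.modify cs[b] 0 (· + 1)
      else (segCnt cs i b, acc).1) = segCnt cs i (b + 1) from hcnt]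
  rw [hflag, hslice]
  cases hpm : (pmN cs (b + 1) == pmN cs i) <;> simp [subStr]

-- A's inner loop, characterised
lemma innerA (cs : List Char) (i : Nat) (acc : List String) :
    ∀ d : Nat, i + d ≤ cs.length →
    (PySem.List.pyRange (i : Int) ((i + d : Nat) : Int) 1).foldl (aStep cs i) (cntD 0 0 0 0 0, acc)
    = (segCnt cs i (i + d), acc ++ (blockB cs i (i + d)).map (fun b => subStr cs i b)) := by
  intro d
  induction d with
  | zero =>
    intro _
    rw [show ((i + 0 : Nat) : Int) = (i : Int) by push_cast; ring,
      PySem.List.pyRange_one_eq_nil (le_refl _)]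
    simp [segCnt, seg, blockB, cntD]
  | succ d ih =>
    intro hd
    have hd' : i + d ≤ cs.length := by omega
    have hlt : i + d < cs.length := by omega
    rw [show ((i + (d + 1) : Nat) : Int) = ((i + d : Nat) : Int) + 1 by push_cast; ring,
      PySem.List.pyRange_one_succ_right (by exact_mod_cast Nat.le_add_right i d),
      List.foldl_append, ih hd']
    simp only [List.foldl_cons, List.foldl_nil]
    rw [aStep_eq cs i (i + d) _ (Nat.le_add_right i d) hlt]
    have hbl : blockB cs i (i + (d + 1))
        = blockB cs i (i + d) ++ (if pmN cs (i + d + 1) == pmN cs i then [i + d + 1] else []) := by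
      unfold blockB
      rw [show i + (d + 1) - i = d + 1 by omega, show i + d - i = d by omega,
        List.range'_concat, show i + 1 + 1 * d = i + d + 1 by ring, List.filter_append]
      congr 1
      rcases h : (pmN cs (i + d + 1) == pmN cs i) with _ | _ <;> simp [h]
    rw [hbl, List.map_append, ← List.append_assoc]
    rw [show i + (d + 1) = i + d + 1 from rfl]
    congr 1
    rcases (pmN cs (i + d + 1) == pmN cs i) with _ | _ <;> simp

-- A's whole loop nest
lemma ansA_eq (cs : List Char) (N : Nat) (hN : N ≤ cs.length) :
    (PySem.List.pyRange 0 (N : Int) 1).foldl (aOuter cs (N : Int)) []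
    = (List.range N).flatMap (fun i => (blockB cs i N).map (fun b => subStr cs i b)) := by
  rw [PySem.List.pyRange_zero_nat, List.foldl_map]
  rw [PySem.List.foldl_congr_mem (List.range N) _
    (fun acc i => acc ++ (blockB cs i N).map (fun b => subStr cs i b)) []
    (by
      intro acc i hi
      have hiN : i ≤ N := le_of_lt (List.mem_range.mp hi)
      show aOuter cs (N : Int) acc ((i : Nat) : Int) = _
      unfold aOuter
      rw [show (pvVowels.foldl (fun d k => d.insert k 0) PySem.Dict.empty) = cntD 0 0 0 0 0 from rfl]
      have h2 := innerA cs i acc (N - i) (by omega)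
      rw [show i + (N - i) = N from by omega] at h2
      rw [h2])]
  rw [PySem.List.foldl_append_eq_flatMap]
  rfl

-- B's scan builds the prefix-mask table
lemma scanB (cs : List Char) : ∀ N : Nat, N ≤ cs.length →
    (PySem.List.pyRange 0 (N : Int) 1).foldl (bScan cs) ([0], 0)
    = ((List.range (N + 1)).map (fun k => pmN cs k), pmN cs N) := by
  intro N
  induction N with
  | zero =>
    intro _
    rw [show ((0 : Nat) : Int) = 0 from rfl, PySem.List.pyRange_one_eq_nil (le_refl _)]
    simp [pmN, pmOf]
  | succ N ih =>
    intro hN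
    have hN' : N ≤ cs.length := by omega
    have hlt : N < cs.length := by omega
    rw [show ((N + 1 : Nat) : Int) = ((N : Nat) : Int) + 1 by push_cast; ring,
      PySem.List.pyRange_one_succ_right (by positivity), List.foldl_append, ih hN']
    simp only [List.foldl_cons, List.foldl_nil]
    have hget : PySem.List.pyGetD cs ((N : Nat) : Int) ' ' = cs[N] := by
      rw [PySem.List.pyGetD_natCast]
      exact List.getD_eq_getElem _ _ hlt
    have hpm : maskStep (pmN cs N) cs[N] = pmN cs (N + 1) := by
      rw [pmN, pmN, take_succ_concat cs N hlt, pmOf_append_singleton]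
    show ((List.range (N + 1)).map (fun k => pmN cs k) ++ [_], _) = _
    rw [show (List.range (N + 1 + 1)) = List.range (N + 1) ++ [N + 1] from List.range_succ,
      List.map_append]
    simp only [hget]
    rw [show (if cs[N] ∈ pvVowels then
          pvIntXor (pmN cs N) ((1 : Int) <<< ((PySem.List.index? pvVowels cs[N]).getD 0))
        else pmN cs N) = maskStep (pmN cs N) cs[N] from rfl, hpm]
    simp

-- ps = positions whose mask is mval
lemma psB (f : Nat → Int) (mval : Int) : ∀ M : Nat,
    ((PySem.List.enumerate ((List.range M).map f) 0).filter (fun p => p.2 == mval)).map (·.1)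
    = ((List.range M).filter (fun k => f k == mval)).map (Nat.cast : Nat → Int) := by
  intro M
  induction M with
  | zero => rfl
  | succ M ih =>
    rw [List.range_succ, List.map_append, PySem.List.enumerate_append, List.filter_append,
      List.map_append, ih, List.filter_append, List.map_append]
    congr 1
    have hlen : (((List.range M).map f).length : Int) = (M : Int) := by simp
    rw [hlen]
    rcases h : (f M == mval) with _ | _ <;> simp [PySem.List.enumerate, h]

lemma pyRange_shift (a b : Int) :
    PySem.List.pyRange (a + 1) (b + 1) 1 = (PySem.List.pyRange a b 1).map (· + 1) := by
  rw [PySem.List.pyRange_one, PySem.List.pyRange_one, List.map_map]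
  have hd : b + 1 - (a + 1) = b - a := by ring
  rw [hd]
  exact List.map_congr_left (fun k _ => by simp; ring)

lemma flatMap_congr_mem {α β : Type} (l : List α) (f g : α → List β)
    (h : ∀ x ∈ l, f x = g x) : l.flatMap f = l.flatMap g := by
  induction l with
  | nil => rfl
  | cons a t ih =>
    simp only [List.flatMap_cons, h a (by simp),
      ih (fun x hx => h x (List.mem_cons_of_mem a hx))]

lemma lexPairs_mem {α : Type} (l : List α) (p : α × α) (hp : p ∈ lexPairs l) :
    p.1 ∈ l ∧ p.2 ∈ l := by
  induction l with
  | nil => simp [lexPairs] at hp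
  | cons a t ih =>
    simp only [lexPairs, List.mem_append, List.mem_map] at hp
    rcases hp with ⟨b, hb, rfl⟩ | hp
    · exact ⟨by simp, by simp [hb]⟩
    · obtain ⟨h1, h2⟩ := ih hp
      exact ⟨List.mem_cons_of_mem a h1, List.mem_cons_of_mem a h2⟩

-- the double index loop emits exactly the lexicographic pairs
lemma idxPairs {β : Type} (g : Int → Int → β) : ∀ ps : List Int,
    (PySem.List.pyRange 0 (ps.length : Int) 1).flatMap (fun x =>
      (PySem.List.pyRange (x + 1) (ps.length : Int) 1).map (fun y =>
        g (PySem.List.pyGetD ps x 0) (PySem.List.pyGetD ps y 0)))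
    = (lexPairs ps).map (fun p => g p.1 p.2) := by
  intro ps
  induction ps with
  | nil => simp [lexPairs, PySem.List.pyRange_one_eq_nil]
  | cons a t ih =>
    have hlen : ((a :: t).length : Int) = (t.length : Int) + 1 := by simp
    rw [hlen, PySem.List.pyRange_one_cons (by positivity), List.flatMap_cons]
    have hsh : PySem.List.pyRange (0 + 1) ((t.length : Int) + 1) 1
        = (PySem.List.pyRange 0 (t.length : Int) 1).map (· + 1) := pyRange_shift _ _
    rw [show (0 : Int) + 1 = 0 + 1 by ring] at *
    rw [hsh]
    have hget : ∀ y : Int, 0 ≤ y →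
        PySem.List.pyGetD (a :: t) (y + 1) 0 = PySem.List.pyGetD t y 0 := by
      intro y h0
      obtain ⟨k, rfl⟩ : ∃ k : Nat, y = (k : Int) := ⟨y.toNat, (Int.toNat_of_nonneg h0).symm⟩
      rw [show ((k : Int) + 1) = ((k + 1 : Nat) : Int) by push_cast; ring,
        PySem.List.pyGetD_natCast, PySem.List.pyGetD_natCast, List.getD_cons_succ]
    -- head block
    have hhead : (PySem.List.pyRange 0 (t.length : Int) 1).map
          ((fun y => g (PySem.List.pyGetD (a :: t) 0 0) (PySem.List.pyGetD (a :: t) y 0)) ∘ (· + 1))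
        = t.map (fun b => g a b) := by
      rw [show (PySem.List.pyGetD (a :: t) 0 0) = a from PySem.List.pyGetD_zero_cons a t 0]
      calc (PySem.List.pyRange 0 (t.length : Int) 1).map
              (fun y => g a (PySem.List.pyGetD (a :: t) (y + 1) 0))
          = (PySem.List.pyRange 0 (t.length : Int) 1).map (fun y => g a (PySem.List.pyGetD t y 0)) :=
            List.map_congr_left (fun y hy => by
              rw [hget y (PySem.List.mem_pyRange_one.mp hy).1])
        _ = ((PySem.List.pyRange 0 (t.length : Int) 1).map (fun y => PySem.List.pyGetD t y 0)).map (g a) := by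
            rw [List.map_map]; rfl
        _ = t.map (g a) := by
            rw [show PySem.List.pyRange 0 (t.length : Int) 1
                = PySem.List.pyRange 0 (PySem.List.len t) 1 by rw [PySem.List.len_eq],
              PySem.List.map_pyGetD_pyRange_zero]
    -- tail blocks
    have htail : ((PySem.List.pyRange 0 (t.length : Int) 1).map (· + 1)).flatMap (fun x =>
          (PySem.List.pyRange (x + 1) ((t.length : Int) + 1) 1).map (fun y =>
            g (PySem.List.pyGetD (a :: t) x 0) (PySem.List.pyGetD (a :: t) y 0)))
        = (lexPairs t).map (fun p => g p.1 p.2) := by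
      rw [List.flatMap_map, ← ih]
      apply flatMap_congr_mem
      intro x hx
      rw [pyRange_shift, List.map_map, hget x (PySem.List.mem_pyRange_one.mp hx).1]
      refine List.map_congr_left (fun y hy => ?_)
      have h0 : 0 ≤ y := by
        have := (PySem.List.mem_pyRange_one.mp hy).1
        have := (PySem.List.mem_pyRange_one.mp hx).1
        omega
      simp only [Function.comp_apply]; rw [hget y h0]
    simp only [lexPairs, List.map_append, List.map_map, Function.comp_def] at hhead ⊢
    rw [← hhead, ← htail]

lemma bPairs_eq (cs : List Char) (ps : List Int) (ans : List String) :
    bPairs cs ps ans = ans ++ (lexPairs ps).map (fun p =>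
      String.ofList (PySem.List.slice cs (some p.1) (some p.2))) := by
  unfold bPairs
  simp only [PySem.List.foldl_append_singleton_eq_map]
  rw [PySem.List.foldl_append_eq_flatMap, idxPairs (fun u v =>
    String.ofList (PySem.List.slice cs (some u) (some v)))]

lemma lexPairs_map {α β : Type} (f : α → β) (l : List α) :
    lexPairs (l.map f) = (lexPairs l).map (Prod.map f f) := by
  induction l with
  | nil => rfl
  | cons a t ih =>
    simp only [List.map_cons, lexPairs, ih, List.map_append, List.map_map]
    rfl

lemma lexPairs_filter {α : Type} (q : α → Bool) (l : List α) :
    lexPairs (l.filter q) = (lexPairs l).filter (fun p => q p.1 && q p.2) := by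
  induction l with
  | nil => rfl
  | cons a t ih =>
    by_cases ha : q a
    · rw [List.filter_cons_of_pos ha]
      simp only [lexPairs, List.filter_append, ih, List.filter_map]
      congr 1
      congr 1
      apply List.filter_congr
      intro b _
      simp [ha]
    · rw [List.filter_cons_of_neg (by simp [ha])]
      simp only [lexPairs, List.filter_append, ih, List.filter_map]
      have h0 : (t.filter ((fun p => q p.1 && q p.2) ∘ fun b => (a, b))) = [] := by
        apply List.filter_eq_nil_iff.mpr
        intro b _
        simp [ha]
      rw [h0]
      rfl

lemma lexPairs_range' : ∀ (c s : Nat), lexPairs (List.range' s c)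
    = (List.range' s c).flatMap (fun a => (List.range' (a + 1) (s + c - (a + 1))).map (fun b => (a, b))) := by
  intro c
  induction c with
  | zero => intro s; rfl
  | succ c ih =>
    intro s
    rw [List.range'_succ, lexPairs, ih (s + 1), List.flatMap_cons]
    have hc : s + (c + 1) - (s + 1) = c := by omega
    rw [hc]
    congr 1
    apply flatMap_congr_mem
    intro a ha
    have h2 : s + 1 + c - (a + 1) = s + (c + 1) - (a + 1) := by omega
    rw [h2]

-- concatenating the per-key filters over distinct covering keys is a permutation
lemma perm_flatMap_filter {α κ : Type} [DecidableEq κ] (key : α → κ) :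
    ∀ (ks : List κ) (X : List α), ks.Nodup → (∀ x ∈ X, key x ∈ ks) →
    (ks.flatMap (fun m => X.filter (fun x => key x == m))).Perm X := by
  intro ks
  induction ks with
  | nil =>
    intro X _ hcov
    cases X with
    | nil => rfl
    | cons x xs => exact absurd (hcov x (by simp)) (by simp)
  | cons k ks ih =>
    intro X hnd hcov
    have hk : k ∉ ks := (List.nodup_cons.mp hnd).1
    have hnd' : ks.Nodup := (List.nodup_cons.mp hnd).2
    rw [List.flatMap_cons]
    have hrw : ks.flatMap (fun m => X.filter (fun x => key x == m))
        = ks.flatMap (fun m => (X.filter (fun x => !(key x == k))).filter (fun x => key x == m)) := by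
      apply flatMap_congr_mem
      intro m hm
      rw [List.filter_filter]
      apply List.filter_congr
      intro x _
      by_cases hxm : key x = m
      · have hmk : ¬ m = k := fun h => hk (h ▸ hm)
        simp [hxm, hmk]
      · simp [hxm]
    rw [hrw]
    have hperm := ih (X.filter (fun x => !(key x == k))) hnd' (by
      intro x hx
      have hxX := List.mem_of_mem_filter hx
      have hne : ¬ (key x == k) = true := by
        have := List.of_mem_filter hx
        simpa using this
      have := hcov x hxX
      rcases List.mem_cons.mp this with h | h
      · exact absurd (by simp [h]) hne
      · exact h)
    exact (List.Perm.append_left _ hperm).trans (List.filter_append_perm _ X)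

-- A's pre-sort list equals the filtered lexicographic pairs, mapped to substrings
lemma ansA_pairs (cs : List Char) (N : Nat) (hN : N ≤ cs.length) :
    (PySem.List.pyRange 0 (N : Int) 1).foldl (aOuter cs (N : Int)) []
    = ((lexPairs (List.range (N + 1))).filter (fun p => pmN cs p.2 == pmN cs p.1)).map
        (fun p => subStr cs p.1 p.2) := by
  rw [ansA_eq cs N hN]
  rw [show List.range (N + 1) = List.range' 0 (N + 1) from List.range_eq_range',
    lexPairs_range', List.filter_flatMap, List.map_flatMap]
  rw [show List.range' 0 (N + 1) = List.range (N + 1) from List.range_eq_range'.symm,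
    List.range_succ, List.flatMap_append]
  have hlast : ([N].flatMap (fun a =>
      ((List.range' (a + 1) (0 + (N + 1) - (a + 1))).map (fun b => (a, b)) |>.filter
        (fun p => pmN cs p.2 == pmN cs p.1)).map (fun p => subStr cs p.1 p.2))) = [] := by
    simp
  rw [hlast, List.append_nil]
  apply flatMap_congr_mem
  intro a ha
  have haN : a < N := List.mem_range.mp ha
  rw [List.filter_map, List.map_map]
  unfold blockB
  have hc : 0 + (N + 1) - (a + 1) = N - a := by omega
  rw [hc]
  congr 1

theorem better_spec_aux (n : Int) (word : String) (h : Pre_better n word) :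
    better n word = better_alt n word := by
  by_cases hn : n ≤ 0
  · unfold better better_alt
    rw [PySem.List.pyRange_one_eq_nil hn]
    with_unfolding_all rfl
  · have h0 : 0 ≤ n := by omega
    have hNn : n = ((n.toNat : Nat) : Int) := (Int.toNat_of_nonneg h0).symm
    unfold Pre_better at h
    generalize hcs : word.toList = cs at *
    generalize hNd : n.toNat = N at *
    have hlen : N ≤ cs.length := by omega
    unfold better better_alt
    rw [hcs, hNn]
    show PySem.List.sorted ((PySem.List.pyRange 0 (N : Int) 1).foldl (aOuter cs (N : Int)) [])
        (fun x => x) false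
      = PySem.List.sorted ((PySem.List.dedup
            (((PySem.List.pyRange 0 (N : Int) 1).foldl (bScan cs) ([0], 0)).1)).foldl
          (bGroup cs (((PySem.List.pyRange 0 (N : Int) 1).foldl (bScan cs) ([0], 0)).1)) [])
        (fun x => x) false
    rw [scanB cs N hlen]
    set pre := (List.range (N + 1)).map (fun k => pmN cs k) with hpre
    set sub := (fun p : Nat × Nat => subStr cs p.1 p.2) with hsub
    set X := (lexPairs (List.range (N + 1))).filter (fun p => pmN cs p.2 == pmN cs p.1) with hX
    -- B's pre-sort list
    have hgroup : ∀ (acc : List String) (m : Int), bGroup cs pre acc m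
        = acc ++ ((lexPairs (List.range (N + 1))).filter
            (fun p => pmN cs p.1 == m && pmN cs p.2 == m)).map sub := by
      intro acc m
      unfold bGroup
      rw [hpre, psB (fun k => pmN cs k) m (N + 1), bPairs_eq, lexPairs_map, List.map_map]
      rw [lexPairs_filter]
      congr 1
      apply List.map_congr_left
      intro p _
      simp only [Function.comp_apply, Prod.map]
      rw [PySem.List.slice_natCast]
      rfl
    have hansB : (PySem.List.dedup pre).foldl (bGroup cs pre) []
        = ((PySem.List.dedup pre).flatMap (fun m => X.filter (fun p => pmN cs p.1 == m))).map sub := by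
      rw [PySem.List.foldl_congr_mem (PySem.List.dedup pre) _
        (fun acc m => acc ++ ((lexPairs (List.range (N + 1))).filter
          (fun p => pmN cs p.1 == m && pmN cs p.2 == m)).map sub) []
        (fun acc m _ => hgroup acc m)]
      rw [PySem.List.foldl_append_eq_flatMap, List.nil_append, List.map_flatMap]
      apply flatMap_congr_mem
      intro m _
      rw [hX, List.filter_filter]
      congr 1
      apply List.filter_congr
      intro p _
      by_cases h1 : pmN cs p.1 = m
      · rw [h1]
      · rw [beq_eq_false_iff_ne.mpr h1]
        simp
    have hcov : ∀ x ∈ X, pmN cs x.1 ∈ PySem.List.dedup pre := by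
      intro x hx
      rw [PySem.List.mem_dedup, hpre]
      exact List.mem_map.mpr ⟨x.1, (lexPairs_mem _ x (List.mem_of_mem_filter hx)).1, rfl⟩
    have hperm : ((PySem.List.dedup pre).flatMap
        (fun m => X.filter (fun p => pmN cs p.1 == m))).Perm X :=
      perm_flatMap_filter (fun p => pmN cs p.1) (PySem.List.dedup pre) X
        (PySem.List.nodup_dedup pre) hcov
    rw [hansB, ansA_pairs cs N hlen]
    exact PySem.List.sorted_eq_sorted_of_perm _ _ (fun x => x) Function.injective_id
      (hperm.map sub).symm

-- ===== VERDICT (by name: the statement is the Claim_ definition above) =====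
theorem better_spec : Claim_equal_better := by
  intro n word _ h
  exact better_spec_aux n word h
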